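-- pv_equiv track=rewrite | github.com/omaruno/NNSTCIP | CNNLSTM.py | do_label_Corretta
-- ===== SOURCE A (Python) =====
-- def do_label_Corretta(y_new):
--     Y_new2 = []
--     for el in y_new:
--         if el =="walk-stairascent" or el =="stairascent" or el =="stairascent-walk":
--             Y_new2.append(0)
--         elif el == "walk-stairdescent" or el =="stairdescent" or el =="stairdescent-walk":
--             Y_new2.append(1)
--         elif el == "walk-rampascent" or el =="rampascent" or el =="rampascent-walk":
--             Y_new2.append(2)
--         elif el == "walk-rampdescent" or el =="rampdescent" or el =="rampdescent-walk":
--             Y_new2.append(3)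
--         else:
--             Y_new2.append(4)
--
--     return Y_new2
-- ===== SOURCE B (Python) =====
-- def do_label_Corretta(y_new):
--     # Parse the label structurally: a valid label is CORE, "walk-"+CORE or CORE+"-walk",
--     # where CORE's position in the list below is its code; anything else is 4.
--     cores = ["stairascent", "stairdescent", "rampascent", "rampdescent"]
--     out = []
--     for el in y_new:
--         if el.startswith("walk-"):
--             core = el[5:]
--         elif el.endswith("-walk"):
--             core = el[:-5]
--         else:
--             core = el
--         out.append(cores.index(core) if core in cores else 4)
--     return out
-- ===== Notes on version B (the rewrite author's own statement) =====
-- stated objective: alternative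
-- what changed: Instead of comparing each element against twelve literal strings, B parses the label structurally: it strips an optional 'walk-' prefix (else an optional '-walk' suffix) and looks the remaining core token up by position in a 4-element core list, whose index is the code (default 4).
import Mathlib
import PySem

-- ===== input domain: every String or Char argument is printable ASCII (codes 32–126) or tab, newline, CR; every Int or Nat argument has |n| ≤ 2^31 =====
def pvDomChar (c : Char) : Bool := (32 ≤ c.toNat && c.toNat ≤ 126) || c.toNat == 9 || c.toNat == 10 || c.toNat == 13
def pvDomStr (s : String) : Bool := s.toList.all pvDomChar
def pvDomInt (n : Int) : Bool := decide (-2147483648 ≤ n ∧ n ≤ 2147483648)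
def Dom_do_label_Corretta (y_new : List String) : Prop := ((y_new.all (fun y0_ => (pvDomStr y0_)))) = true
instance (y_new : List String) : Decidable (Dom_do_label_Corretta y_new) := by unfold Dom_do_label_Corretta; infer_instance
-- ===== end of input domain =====

-- B parses each label structurally (strip an optional "walk-" prefix, else an optional "-walk"
-- suffix, then look the core token up by position in a 4-element list) instead of A's
-- 12-comparison if/elif cascade; identical outputs, including 4 for unknown labels.

-- ===== PORT A =====
-- literal transliteration: loop appending to Y_new2 via the if/elif cascade
def do_label_Corretta (y_new : List String) : List Int :=
  y_new.foldl (fun Y_new2 el =>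
    if el = "walk-stairascent" ∨ el = "stairascent" ∨ el = "stairascent-walk" then
      Y_new2 ++ [0]
    else if el = "walk-stairdescent" ∨ el = "stairdescent" ∨ el = "stairdescent-walk" then
      Y_new2 ++ [1]
    else if el = "walk-rampascent" ∨ el = "rampascent" ∨ el = "rampascent-walk" then
      Y_new2 ++ [2]
    else if el = "walk-rampdescent" ∨ el = "rampdescent" ∨ el = "rampdescent-walk" then
      Y_new2 ++ [3]
    else
      Y_new2 ++ [4]) []

-- ===== PORT B =====
-- transliteration of Source B: strip "walk-" prefix (else "-walk" suffix), then cores.index lookup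
def pvCores : List String := ["stairascent", "stairdescent", "rampascent", "rampdescent"]

-- the body of Source B's loop: core := stripped label; cores.index(core) if core in cores else 4
def pvStep (el : String) : Int :=
  let core :=
    if PySem.Str.startswith el "walk-" then PySem.Str.slice el (some 5) none
    else if PySem.Str.endswith el "-walk" then PySem.Str.slice el none (some (-5))
    else el
  if pvCores.contains core then (((PySem.List.index? pvCores core).getD 0 : Nat) : Int) else 4

def do_label_Corretta_alt (y_new : List String) : List Int :=
  y_new.foldl (fun out el => out ++ [pvStep el]) []

-- ===== PRECONDITION & SPEC =====
def Spec_do_label_Corretta (y_new : List String) (out : List Int) : Prop := out = do_label_Corretta_alt y_new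
instance (y_new : List String) (out : List Int) : Decidable (Spec_do_label_Corretta y_new out) := by unfold Spec_do_label_Corretta; infer_instance

-- ===== CLAIM =====
def Claim_equal_do_label_Corretta : Prop := ∀ (y_new : List String), Dom_do_label_Corretta y_new → Spec_do_label_Corretta y_new (do_label_Corretta y_new)

-- ===== LEMMAS AND PROOFS =====
theorem pv_prefix_recon (el : String) (hp : PySem.Str.startswith el "walk-" = true) :
    el.toList = "walk-".toList ++ (PySem.Str.slice el (some 5) none).toList := by
  obtain ⟨t, ht⟩ := (PySem.Chars.startswith_iff _ _).mp (by simpa using hp)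
  have hd : (PySem.Str.slice el (some 5) none).toList = el.toList.drop 5 := by
    simp only [PySem.Str.slice, PySem.Chars.slice_eq_listSlice]
    rw [PySem.List.slice_from _ (by norm_num)]
    simp
  rw [hd, ← ht]
  simp

theorem pv_suffix_recon (el : String) (hs : PySem.Str.endswith el "-walk" = true) :
    el.toList = (PySem.Str.slice el none (some (-5))).toList ++ "-walk".toList := by
  obtain ⟨t, ht⟩ := (PySem.Chars.endswith_iff _ _).mp (by simpa using hs)
  have hd : (PySem.Str.slice el none (some (-5))).toList = t := by
    simp only [PySem.Str.slice, PySem.Chars.slice_eq_listSlice]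
    rw [PySem.List.slice_to_neg_ofNat el.toList 5 (by omega), ← ht]
    simp
  rw [hd, ← ht]; congr 1

theorem pv_step (el : String) :
    (if el = "walk-stairascent" ∨ el = "stairascent" ∨ el = "stairascent-walk" then (0:Int)
     else if el = "walk-stairdescent" ∨ el = "stairdescent" ∨ el = "stairdescent-walk" then 1
     else if el = "walk-rampascent" ∨ el = "rampascent" ∨ el = "rampascent-walk" then 2
     else if el = "walk-rampdescent" ∨ el = "rampdescent" ∨ el = "rampdescent-walk" then 3
     else 4) = pvStep el := by
  split_ifs with h1 h2 h3 h4
  · rcases h1 with h | h | h <;> subst h <;> decide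
  · rcases h2 with h | h | h <;> subst h <;> decide
  · rcases h3 with h | h | h <;> subst h <;> decide
  · rcases h4 with h | h | h <;> subst h <;> decide
  · -- el is none of the 12 labels: B's core lookup misses and also yields 4
    unfold pvStep
    by_cases hp : PySem.Str.startswith el "walk-" = true
    · simp only [hp, if_true]
      by_cases hc : pvCores.contains (PySem.Str.slice el (some 5) none) = true
      · exfalso
        have hmem : PySem.Str.slice el (some 5) none ∈ pvCores := by simpa using hc
        have hrec := pv_prefix_recon el hp
        simp only [pvCores, List.mem_cons, List.not_mem_nil, or_false] at hmem
        rcases hmem with h | h | h | h <;> rw [h] at hrec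
        · exact h1 (Or.inl (String.toList_inj.mp (by rw [hrec]; decide)))
        · exact h2 (Or.inl (String.toList_inj.mp (by rw [hrec]; decide)))
        · exact h3 (Or.inl (String.toList_inj.mp (by rw [hrec]; decide)))
        · exact h4 (Or.inl (String.toList_inj.mp (by rw [hrec]; decide)))
      · exact (if_neg hc).symm
    · simp only [hp, Bool.false_eq_true, if_false]
      by_cases hs : PySem.Str.endswith el "-walk" = true
      · simp only [hs, if_true]
        by_cases hc : pvCores.contains (PySem.Str.slice el none (some (-5))) = true
        · exfalso
          have hmem : PySem.Str.slice el none (some (-5)) ∈ pvCores := by simpa using hc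
          have hrec := pv_suffix_recon el hs
          simp only [pvCores, List.mem_cons, List.not_mem_nil, or_false] at hmem
          rcases hmem with h | h | h | h <;> rw [h] at hrec
          · exact h1 (Or.inr (Or.inr (String.toList_inj.mp (by rw [hrec]; decide))))
          · exact h2 (Or.inr (Or.inr (String.toList_inj.mp (by rw [hrec]; decide))))
          · exact h3 (Or.inr (Or.inr (String.toList_inj.mp (by rw [hrec]; decide))))
          · exact h4 (Or.inr (Or.inr (String.toList_inj.mp (by rw [hrec]; decide))))
        · exact (if_neg hc).symm
      · simp only [hs, Bool.false_eq_true, if_false]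
        by_cases hc : pvCores.contains el = true
        · exfalso
          have hmem : el ∈ pvCores := by simpa using hc
          simp only [pvCores, List.mem_cons, List.not_mem_nil, or_false] at hmem
          rcases hmem with h | h | h | h
          · exact h1 (Or.inr (Or.inl h))
          · exact h2 (Or.inr (Or.inl h))
          · exact h3 (Or.inr (Or.inl h))
          · exact h4 (Or.inr (Or.inl h))
        · exact (if_neg hc).symm

theorem pv_main (y_new : List String) : do_label_Corretta y_new = do_label_Corretta_alt y_new := by
  unfold do_label_Corretta do_label_Corretta_alt
  induction y_new using List.reverseRecOn with
  | nil => rfl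
  | append_singleton xs x ih =>
      simp only [List.foldl_append, List.foldl_cons, List.foldl_nil, ih]
      rw [← pv_step x]
      split_ifs <;> rfl

-- ===== VERDICT =====
theorem do_label_Corretta_spec : Claim_equal_do_label_Corretta := by
  intro y_new _
  exact pv_main y_new
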